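-- pv_equiv track=rewrite | github.com/maitreya-v/Unicode-Tasks | Backend/Task 2,3/home/Task_1.py | madmax
-- ===== SOURCE A (Python) =====
-- def madmax(a,b):
--   dict={}
--   for i in range(a,b):
--      c=0
--      binary=bin(i)
--      for index in binary:
--          if(index=='1' and c=='1'):
--              answer=True
--              break
--          else:
--              answer=False
--          c=index
--      dict[i]=answer
--   return dict
-- ===== SOURCE B (Python) =====
-- def madmax(a, b):
--     return {i: (abs(i) & (abs(i) >> 1)) != 0 for i in range(a, b)}
-- ===== Notes on version B (the rewrite author's own statement) =====
-- stated objective: idiomatic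
-- what changed: Replaces the per-number character scan of bin(i) (tracking the previous character to spot two consecutive '1's) with the closed-form bitwise test (abs(i) & (abs(i) >> 1)) != 0 in a dict comprehension, eliminating the inner loop and string construction entirely.
import Mathlib
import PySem

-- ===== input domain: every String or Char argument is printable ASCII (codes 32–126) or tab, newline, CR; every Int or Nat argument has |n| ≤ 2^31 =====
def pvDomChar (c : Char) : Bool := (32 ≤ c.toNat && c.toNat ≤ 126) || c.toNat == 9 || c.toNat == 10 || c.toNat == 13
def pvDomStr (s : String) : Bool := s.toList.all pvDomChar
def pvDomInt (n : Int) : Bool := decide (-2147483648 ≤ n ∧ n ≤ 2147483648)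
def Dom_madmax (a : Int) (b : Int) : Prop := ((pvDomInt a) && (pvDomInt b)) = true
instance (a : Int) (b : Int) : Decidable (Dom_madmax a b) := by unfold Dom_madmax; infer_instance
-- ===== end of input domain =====

-- B replaces A's per-number character scan of bin(i) with the closed-form bitwise
-- test (abs(i) & (abs(i) >> 1)) != 0 in a dict comprehension (objective: idiomatic).

-- ===== PORT A =====
-- inner 'for index in binary' loop: c starts as the int 0 (never equal to '1'),
-- modelled as 'none'; the loop body's 'answer=False … c=index' is the recursion,
-- falling off the end returns False (bin(i) is never empty, so 'answer' is set).
def madmaxLoop : List Char → Option Char → Bool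
  | [], _ => false
  | x :: rest, c => if x == '1' && c == some '1' then true else madmaxLoop rest (some x)

def madmax (a : Int) (b : Int) : List (Int × Bool) :=
  ((PySem.List.pyRange a b 1).foldl
    (fun d i => d.insert i (madmaxLoop (PySem.Int.pyBin i).toList none))
    (PySem.Dict.empty : PySem.Dict Int Bool)).items

-- ===== PORT B =====
def madmax_alt (a : Int) (b : Int) : List (Int × Bool) :=
  (PySem.Dict.ofList ((PySem.List.pyRange a b 1).map
    (fun i => (i, decide (PySem.Int.band |i| (|i| >>> (1 : Nat)) ≠ 0))))).items

-- ===== PRECONDITION & SPEC =====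
def Spec_madmax (a : Int) (b : Int) (out : List (Int × Bool)) : Prop := out = madmax_alt a b
instance (a : Int) (b : Int) (out : List (Int × Bool)) : Decidable (Spec_madmax a b out) := by unfold Spec_madmax; infer_instance

-- ===== CLAIM (what is proved, stated in full; the proofs are below) =====
def Claim_equal_madmax : Prop := ∀ (a : Int) (b : Int), Dom_madmax a b → Spec_madmax a b (madmax a b)

-- ===== LEMMAS AND PROOFS =====

-- "the string has two consecutive '1' characters"
def hasPair : List Char → Bool
  | [] => false
  | x :: t => (x == '1' && t.head? == some '1') || hasPair t

theorem madmaxLoop_eq_hasPair (xs : List Char) :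
    ∀ c : Option Char, madmaxLoop xs c = ((c == some '1' && xs.head? == some '1') || hasPair xs) := by
  induction xs with
  | nil => intro c; simp [madmaxLoop, hasPair]
  | cons x t ih =>
    intro c
    simp only [madmaxLoop, hasPair, ih (some x), List.head?_cons]
    by_cases hx : x = '1' <;> by_cases hc : c = some '1' <;> simp [hx, hc]

-- MSB-first binary digits, structurally
def myBin (n : Nat) : List Char :=
  if n < 2 then [Nat.digitChar n] else myBin (n / 2) ++ [Nat.digitChar (n % 2)]
  decreasing_by exact Nat.div_lt_self (by omega) (by omega)

theorem toDigitsCore_acc (f : Nat) :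
    ∀ (n : Nat) (ds : List Char),
      Nat.toDigitsCore 2 f n ds = Nat.toDigitsCore 2 f n [] ++ ds := by
  induction f with
  | zero => intro n ds; simp [Nat.toDigitsCore]
  | succ f ih =>
    intro n ds
    simp only [Nat.toDigitsCore]
    by_cases h : n / 2 = 0
    · simp [h]
    · simp only [if_neg h]
      rw [ih (n / 2) [(n % 2).digitChar], ih (n / 2) ((n % 2).digitChar :: ds)]
      simp

theorem toDigitsCore_eq_myBin (f : Nat) :
    ∀ n : Nat, n < f → Nat.toDigitsCore 2 f n [] = myBin n := by
  induction f with
  | zero => intro n h; omega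
  | succ f ih =>
    intro n h
    simp only [Nat.toDigitsCore]
    by_cases h0 : n / 2 = 0
    · have hn : n < 2 := by omega
      have : n % 2 = n := by omega
      rw [myBin]
      simp [h0, hn, this]
    · rw [if_neg h0, toDigitsCore_acc, ih (n / 2) (by omega)]
      conv_rhs => rw [myBin]
      rw [if_neg (by omega)]

theorem toDigits_eq_myBin (n : Nat) : Nat.toDigits 2 n = myBin n :=
  toDigitsCore_eq_myBin (n + 1) n (by omega)

theorem getLast?_myBin (n : Nat) : (myBin n).getLast? = some (Nat.digitChar (n % 2)) := by
  rw [myBin]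
  by_cases h : n < 2
  · have : n % 2 = n := by omega
    simp [h, this]
  · simp [h]

theorem hasPair_append_singleton (xs : List Char) (d : Char) :
    hasPair (xs ++ [d]) = (hasPair xs || (xs.getLast? == some '1' && d == '1')) := by
  induction xs with
  | nil => simp [hasPair]
  | cons x t ih =>
    cases t with
    | nil => simp [hasPair, Bool.or_comm]
    | cons y t' =>
      simp only [List.cons_append, hasPair, List.head?_cons]
      rw [show (y == '1' && (t' ++ [d]).head? == some '1' || hasPair (t' ++ [d]))
            = hasPair (y :: (t' ++ [d])) from rfl]
      rw [show hasPair (y :: (t' ++ [d])) = hasPair ((y :: t') ++ [d]) from rfl, ih]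
      simp [hasPair, Bool.or_assoc]

theorem digitChar_mod_two_eq_one (m : Nat) :
    (Nat.digitChar (m % 2) == '1') = decide (m % 2 = 1) := by
  rcases Nat.mod_two_eq_zero_or_one m with h | h <;> simp [h, Nat.digitChar]

theorem and_half_ne_zero (n : Nat) :
    (n &&& n / 2 ≠ 0) ↔ ((n / 2 &&& n / 2 / 2 ≠ 0) ∨ (n / 2 % 2 = 1 ∧ n % 2 = 1)) := by
  have h2 : (n &&& n / 2) % 2 = 1 ↔ (n % 2 = 1 ∧ (n / 2) % 2 = 1) := by
    simp [Nat.and_mod_two_eq_one]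
  have h3 : (n &&& n / 2) / 2 = n / 2 &&& n / 2 / 2 := Nat.and_div_two
  have hm : (n &&& n / 2) % 2 = 0 ∨ (n &&& n / 2) % 2 = 1 := Nat.mod_two_eq_zero_or_one _
  omega

theorem hasPair_myBin (n : Nat) : hasPair (myBin n) = decide (n &&& n / 2 ≠ 0) := by
  induction n using Nat.strong_induction_on with
  | _ n ih =>
    rw [myBin]
    by_cases h : n < 2
    · have h0 : n / 2 = 0 := by omega
      simp [h, hasPair, h0]
    · rw [if_neg h, hasPair_append_singleton, ih (n / 2) (Nat.div_lt_self (by omega) (by omega)),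
        getLast?_myBin]
      have hd : (some (Nat.digitChar (n / 2 % 2)) == some '1') = decide (n / 2 % 2 = 1) := by
        simpa using digitChar_mod_two_eq_one (n / 2)
      rw [hd, digitChar_mod_two_eq_one]
      by_cases hA : n / 2 &&& n / 2 / 2 ≠ 0 <;> by_cases hB : n / 2 % 2 = 1 <;>
        by_cases hC : n % 2 = 1 <;>
        simp [hA, hB, hC, and_half_ne_zero n]

-- the pointwise bridge: A's scan of bin(i) equals B's bitwise test
theorem pointwise (i : Int) :
    madmaxLoop (PySem.Int.pyBin i).toList none
      = decide (PySem.Int.band |i| (|i| >>> (1 : Nat)) ≠ 0) := by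
  have habs : (|i| : Int) = (i.natAbs : Int) := Int.abs_eq_natAbs i
  have hshift : ((i.natAbs : Int)) >>> (1 : Nat) = ((i.natAbs >>> 1 : Nat) : Int) := rfl
  have hband : PySem.Int.band (i.natAbs : Int) ((i.natAbs >>> 1 : Nat) : Int)
      = ((i.natAbs &&& i.natAbs >>> 1 : Nat) : Int) := PySem.Int.band_natCast _ _
  rw [habs, hshift, hband]
  have hrhs : (((i.natAbs &&& i.natAbs >>> 1 : Nat) : Int) ≠ 0) ↔ (i.natAbs &&& i.natAbs / 2 ≠ 0) := by
    rw [Nat.shiftRight_one]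
    exact_mod_cast Iff.rfl.not
  have hL : madmaxLoop (PySem.Int.pyBin i).toList none = hasPair (Nat.toDigits 2 i.natAbs) := by
    rw [PySem.Int.toList_pyBin, PySem.Int.toBinChars0b]
    by_cases hi : i < 0
    · have : i.natAbs = i.natAbs := rfl
      simp only [if_pos hi]
      rw [madmaxLoop, if_neg (by decide), madmaxLoop, if_neg (by decide),
        madmaxLoop, if_neg (by decide)]
      rw [madmaxLoop_eq_hasPair]
      simp
    · simp only [if_neg hi]
      rw [madmaxLoop, if_neg (by decide), madmaxLoop, if_neg (by decide)]
      rw [madmaxLoop_eq_hasPair]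
      have : i.toNat = i.natAbs := by omega
      simp [this]
  rw [hL, toDigits_eq_myBin, hasPair_myBin]
  simp [hrhs]

-- ===== VERDICT (by name: the statement is the Claim_ definition above) =====
theorem madmax_spec : Claim_equal_madmax := by
  intro a b _
  unfold Spec_madmax madmax madmax_alt
  rw [PySem.Dict.ofList]
  unfold PySem.Dict.update
  rw [List.foldl_map]
  simp only [pointwise]
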